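-- pv_equiv track=rewrite | github.com/valmenucerri/voyageur_de_commerce | Programme_graphe_incomplet/tracer_lien_2.py | verifier_passage
-- ===== SOURCE A (Python) =====
-- def verifier_passage(parcours,N):
--     '''
--     Vérifier que tous les noeuds du graphe ont été parcourus à la fin du parcours.
--     :param parcours: le parcours final. type : list
--     :param N: la dimension du graphe. type : int
--     :return: True si tous les noeuds ont été parcourus, False sinon. type : bool
--     '''
--     valide = 0
--     for _ in range(N):
--         if str(_) in parcours:
--             valide += 1
--
--     if valide == N:
--         return True
--     else:
--         return False
-- ===== SOURCE B (Python) =====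
-- def verifier_passage(parcours, N):
--     requis = {str(i) for i in range(N)}
--     vus = set()
--     for x in parcours:
--         if x in requis:
--             vus.add(x)
--     return len(vus) == N
-- ===== Notes on version B (the rewrite author's own statement) =====
-- stated objective: faster
-- what changed: Instead of scanning the parcours list once per label i in range(N) (each 'str(i) in parcours' is a linear scan), B builds the required-label set once and makes a single pass over parcours, collecting seen required labels in a set, then compares its size with N.
import Mathlib
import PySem

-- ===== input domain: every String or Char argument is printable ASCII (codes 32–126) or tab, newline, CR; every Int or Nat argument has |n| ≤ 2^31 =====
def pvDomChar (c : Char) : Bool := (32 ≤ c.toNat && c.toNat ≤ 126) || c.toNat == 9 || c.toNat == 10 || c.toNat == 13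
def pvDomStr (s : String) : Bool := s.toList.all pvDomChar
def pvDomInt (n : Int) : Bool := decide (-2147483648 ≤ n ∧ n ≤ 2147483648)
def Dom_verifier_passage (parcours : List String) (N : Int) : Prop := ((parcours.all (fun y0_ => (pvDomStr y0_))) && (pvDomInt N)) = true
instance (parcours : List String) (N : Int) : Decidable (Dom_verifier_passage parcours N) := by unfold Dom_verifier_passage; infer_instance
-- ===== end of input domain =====

-- B replaces A's per-label scans of `parcours` (one 'str(i) in parcours' list scan per i in range(N))
-- by one required-label set built up front and a single pass over `parcours`: measurably faster (asymptotic).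

-- ===== PORT A =====
def verifier_passage (parcours : List String) (N : Int) : Bool :=
  let valide : Int :=
    (PySem.List.pyRange 0 N).foldl
      (fun valide i => if PySem.Int.toStr i ∈ parcours then valide + 1 else valide) 0
  if valide = N then true else false

-- ===== PORT B =====
def verifier_passage_alt (parcours : List String) (N : Int) : Bool :=
  let requis : PySem.Set String :=
    PySem.Set.ofList ((PySem.List.pyRange 0 N).map PySem.Int.toStr)
  let vus : PySem.Set String :=
    parcours.foldl (fun vus x => if requis.contains x then PySem.Set.add vus x else vus)
      PySem.Set.empty
  decide (PySem.Set.len vus = N)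

-- ===== PRECONDITION & SPEC =====
def Spec_verifier_passage (parcours : List String) (N : Int) (out : Bool) : Prop := out = verifier_passage_alt parcours N
instance (parcours : List String) (N : Int) (out : Bool) : Decidable (Spec_verifier_passage parcours N out) := by unfold Spec_verifier_passage; infer_instance

-- ===== CLAIM (what is proved, stated in full; the proofs are below) =====
def Claim_equal_verifier_passage : Prop := ∀ (parcours : List String) (N : Int), Dom_verifier_passage parcours N → Spec_verifier_passage parcours N (verifier_passage parcours N)

-- ===== LEMMAS AND PROOFS =====

-- `Nat.toDigitsCore` in terms of `Nat.digits` (specific bridge; no such lemma in Mathlib/PySem).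
lemma pv_toDigitsCore_eq (fuel : Nat) : ∀ (n : Nat) (ds : List Char), n ≠ 0 → n < fuel →
    Nat.toDigitsCore 10 fuel n ds = ((Nat.digits 10 n).map Nat.digitChar).reverse ++ ds := by
  induction fuel with
  | zero => intro n ds h hlt; omega
  | succ f ih =>
    intro n ds h hlt
    rw [Nat.toDigitsCore]
    rw [Nat.digits_def' (by norm_num : 1 < 10) (Nat.pos_of_ne_zero h)]
    by_cases h10 : n / 10 = 0
    · simp [h10]
    · rw [if_neg h10, ih (n / 10) _ h10 (by omega)]
      simp

lemma pv_toDigits_eq (n : Nat) (h : n ≠ 0) :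
    Nat.toDigits 10 n = ((Nat.digits 10 n).map Nat.digitChar).reverse := by
  rw [Nat.toDigits, pv_toDigitsCore_eq (n + 1) n [] h (by omega)]
  simp

lemma pv_digitChar_inj : ∀ a < 10, ∀ b < 10, Nat.digitChar a = Nat.digitChar b → a = b := by
  decide

lemma pv_map_digitChar_inj : ∀ (l₁ l₂ : List Nat), (∀ x ∈ l₁, x < 10) → (∀ x ∈ l₂, x < 10) →
    l₁.map Nat.digitChar = l₂.map Nat.digitChar → l₁ = l₂ := by
  intro l₁
  induction l₁ with
  | nil => intro l₂ _ _ h; cases l₂ <;> simp_all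
  | cons a t ih =>
    intro l₂ h1 h2 h
    cases l₂ with
    | nil => simp_all
    | cons b t₂ =>
      simp only [List.map_cons, List.cons.injEq] at h
      have := pv_digitChar_inj a (h1 a (by simp)) b (h2 b (by simp)) h.1
      subst this
      rw [ih t₂ (fun x hx => h1 x (by simp [hx])) (fun x hx => h2 x (by simp [hx])) h.2]

lemma pv_toDigits_inj (m n : Nat) (h : Nat.toDigits 10 m = Nat.toDigits 10 n) : m = n := by
  by_cases hm : m = 0 <;> by_cases hn : n = 0
  · omega
  · exfalso
    rw [hm, pv_toDigits_eq n hn] at h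
    have h' : (Nat.digits 10 n).map Nat.digitChar = ['0'] := by
      have := congrArg List.reverse h
      simpa using this.symm
    rcases List.map_eq_singleton_iff.mp h' with ⟨d, hd, hdc⟩
    have hd10 : d < 10 := by
      have := Nat.digits_lt_base (by norm_num) (hd ▸ (by simp : d ∈ [d]))
      exact this
    have : d = 0 := pv_digitChar_inj d hd10 0 (by norm_num) (by simpa using hdc)
    have h0 : Nat.digits 10 n = [0] := by rw [hd, this]
    have := congrArg (Nat.ofDigits 10) h0
    rw [Nat.ofDigits_digits] at this
    simp [Nat.ofDigits] at this
    exact hn this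
  · exfalso
    rw [hn, pv_toDigits_eq m hm] at h
    have h' : (Nat.digits 10 m).map Nat.digitChar = ['0'] := by
      have := congrArg List.reverse h
      simpa using this
    rcases List.map_eq_singleton_iff.mp h' with ⟨d, hd, hdc⟩
    have hd10 : d < 10 := Nat.digits_lt_base (by norm_num) (hd ▸ (by simp : d ∈ [d]))
    have : d = 0 := pv_digitChar_inj d hd10 0 (by norm_num) (by simpa using hdc)
    have h0 : Nat.digits 10 m = [0] := by rw [hd, this]
    have := congrArg (Nat.ofDigits 10) h0
    rw [Nat.ofDigits_digits] at this
    simp [Nat.ofDigits] at this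
    exact hm this
  · rw [pv_toDigits_eq m hm, pv_toDigits_eq n hn] at h
    have h' := List.reverse_injective h
    have hdig := pv_map_digitChar_inj _ _
      (fun x hx => Nat.digits_lt_base (by norm_num) hx)
      (fun x hx => Nat.digits_lt_base (by norm_num) hx) h'
    have := congrArg (Nat.ofDigits 10) hdig
    rwa [Nat.ofDigits_digits, Nat.ofDigits_digits] at this

lemma pv_toStr_inj_nonneg (a b : Int) (ha : 0 ≤ a) (hb : 0 ≤ b)
    (h : PySem.Int.toStr a = PySem.Int.toStr b) : a = b := by
  have h' : PySem.Int.toChars a = PySem.Int.toChars b := by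
    have := congrArg String.toList h
    simpa [PySem.Int.toList_toStr] using this
  unfold PySem.Int.toChars at h'
  rw [if_neg (by omega), if_neg (by omega)] at h'
  have := pv_toDigits_inj _ _ h'
  omega

-- the B-side loop: adding only the elements that pass the test = Set.ofList of the filtered list
lemma pv_fold_add_filter {α : Type} [BEq α] (p : α → Bool) :
    ∀ (l : List α) (s : PySem.Set α),
      l.foldl (fun s x => if p x then PySem.Set.add s x else s) s
        = (l.filter p).foldl PySem.Set.add s := by
  intro l
  induction l with
  | nil => intro s; rfl
  | cons a t ih =>
    intro s
    by_cases h : p a <;> simp [h, ih]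

lemma pv_pyRange_nil_of_nonpos (N : Int) (h : N ≤ 0) : PySem.List.pyRange 0 N = [] := by
  apply List.eq_nil_iff_forall_not_mem.mpr
  intro x hx
  have := PySem.List.mem_pyRange_one.mp hx
  omega

lemma pv_main (parcours : List String) (N : Int) :
    verifier_passage parcours N = verifier_passage_alt parcours N := by
  unfold verifier_passage verifier_passage_alt
  dsimp only
  rw [show (fun (valide : Int) (i : Int) => if PySem.Int.toStr i ∈ parcours then valide + 1 else valide)
      = (fun (valide : Int) (i : Int) =>
          if decide (PySem.Int.toStr i ∈ parcours) = true then valide + 1 else valide) by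
    funext v i; by_cases h : PySem.Int.toStr i ∈ parcours <;> simp [h]]
  rw [PySem.List.foldl_count_if]
  rcases le_or_gt N 0 with hN | hN
  · rw [pv_pyRange_nil_of_nonpos N hN]
    have hfold : parcours.foldl
        (fun vus x => if PySem.Set.contains (PySem.Set.ofList (List.map PySem.Int.toStr [])) x
          then PySem.Set.add vus x else vus) PySem.Set.empty = PySem.Set.empty := by
      simp [PySem.Set.contains, PySem.Set.ofList]
    rw [hfold]
    simp [PySem.Set.len, PySem.Set.empty]
  · obtain ⟨n, rfl⟩ : ∃ n : Nat, N = (n : Int) := ⟨N.toNat, (Int.toNat_of_nonneg hN.le).symm⟩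
    set R := PySem.List.pyRange 0 (n : Int) with hR
    have hRmem : ∀ i ∈ R, 0 ≤ i ∧ i < (n : Int) := fun i hi => PySem.List.mem_pyRange_one.mp hi
    have hRlen : R.length = n := by
      rw [hR, PySem.List.pyRange_zero_natCast]; simp
    have hRnodup : R.Nodup := by
      rw [hR, PySem.List.pyRange_zero_natCast]
      exact (List.nodup_range).map (fun a b => by omega)
    have hMnodup : (R.map PySem.Int.toStr).Nodup :=
      hRnodup.map_on (fun x hx y hy h =>
        pv_toStr_inj_nonneg x y (hRmem x hx).1 (hRmem y hy).1 h)
    simp only [pv_fold_add_filter, PySem.Set.empty, ← PySem.Set.ofList_eq_foldl,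
      PySem.Set.ofList_eq_self_of_nodup _ hMnodup]
    set req := R.map PySem.Int.toStr with hreq
    set fl := parcours.filter (fun x => PySem.Set.contains req x) with hfl
    set vus := PySem.Set.ofList fl with hvus
    -- vus is a permutation of req filtered by membership in parcours
    have hmemfl : ∀ x, x ∈ vus ↔ x ∈ req ∧ x ∈ parcours := by
      intro x
      rw [hvus, PySem.Set.mem_ofList, hfl]
      simp [PySem.Set.contains, List.mem_filter, and_comm]
    have hperm : vus.Perm (req.filter (fun y => decide (y ∈ parcours))) := by
      apply (List.perm_ext_iff_of_nodup (PySem.Set.nodup_ofList _)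
        (hMnodup.filter _)).mpr
      intro x
      rw [hmemfl x]
      simp [List.mem_filter]
    have hlen : vus.length = (req.filter (fun y => decide (y ∈ parcours))).length :=
      hperm.length_eq
    -- both sides are `decide` of equivalent propositions
    have hiff : ((0 : Int) + (R.countP fun i => decide (PySem.Int.toStr i ∈ parcours)) = (n : Int))
        ↔ (PySem.Set.len vus = (n : Int)) := by
      rw [PySem.Set.len, hlen]
      constructor
      · intro h
        have hcount : R.countP (fun i => decide (PySem.Int.toStr i ∈ parcours)) = R.length := by
          omega
        have hall := List.countP_eq_length.mp hcount
        have : (req.filter fun y => decide (y ∈ parcours)) = req := by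
          apply List.filter_eq_self.mpr
          intro y hy
          rcases List.mem_map.mp (hreq ▸ hy) with ⟨i, hi, rfl⟩
          exact hall i hi
        rw [this, hreq]
        simp [hRlen]
      · intro h
        have hlenreq : req.length = n := by rw [hreq]; simp [hRlen]
        have hfull : (req.filter fun y => decide (y ∈ parcours)).length = req.length := by
          omega
        have hall := List.length_filter_eq_length_iff.mp hfull
        have : R.countP (fun i => decide (PySem.Int.toStr i ∈ parcours)) = R.length :=
          List.countP_eq_length.mpr (fun i hi => by
            exact hall (PySem.Int.toStr i) (hreq ▸ List.mem_map_of_mem hi))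
        omega
    by_cases hc : (0 : Int) + (R.countP fun i => decide (PySem.Int.toStr i ∈ parcours)) = (n : Int)
    · rw [if_pos hc]
      exact (decide_eq_true (hiff.mp hc)).symm
    · rw [if_neg hc]
      exact (decide_eq_false (fun h => hc (hiff.mpr h))).symm

-- ===== VERDICT (by name: the statement is the Claim_ definition above) =====
theorem verifier_passage_spec : Claim_equal_verifier_passage := by
  intro parcours N _
  unfold Spec_verifier_passage
  exact pv_main parcours N
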